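-- pv_equiv track=rewrite | github.com/SerinaRica/EduRiskX | reasoning/intervention_mapper.py | map_interventions
-- ===== SOURCE A (Python) =====
-- def map_interventions(triggered_rules):
--     res = []
--     seen = set()
--     for r in triggered_rules:
--         t = r.get("theory", "")
--         if t == "Engagement":
--             for s in ["Increase learning interaction activities", "Set weekly learning goals", "Provide learning progress feedback"]:
--                 if s not in seen:
--                     res.append(s); seen.add(s)
--         elif t == "SelfEfficacy":
--             for s in ["Share success stories", "Break down complex tasks into small steps", "Give timely positive feedback"]:
--                 if s not in seen:
--                     res.append(s); seen.add(s)
--         elif t == "StudentIntegration":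
--             for s in ["Invite to join study groups", "Encourage participation in forum discussions", "Organize online social activities"]:
--                 if s not in seen:
--                     res.append(s); seen.add(s)
--     return res[:6]
-- ===== SOURCE B (Python) =====
-- MAP = {
--     "Engagement": ["Increase learning interaction activities", "Set weekly learning goals", "Provide learning progress feedback"],
--     "SelfEfficacy": ["Share success stories", "Break down complex tasks into small steps", "Give timely positive feedback"],
--     "StudentIntegration": ["Invite to join study groups", "Encourage participation in forum discussions", "Organize online social activities"],
-- }
--
-- def map_interventions(triggered_rules):
--     # Dedup at the theory level: the per-theory suggestion lists are pairwise
--     # disjoint and duplicate-free, so the result is just the concatenation of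
--     # the lists for the theories in order of first occurrence, capped at 6.
--     order = []
--     for r in triggered_rules:
--         t = r.get("theory", "")
--         if t in MAP and t not in order:
--             order.append(t)
--     return [s for t in order for s in MAP[t]][:6]
-- ===== Notes on version B (the rewrite author's own statement) =====
-- stated objective: simpler
-- what changed: Replaces the three-branch if/elif chain with per-string seen-set dedup by a table lookup that dedups at the theory level: collect the ordered first occurrences of known theories, then concatenate their fixed suggestion lists (disjoint, so no string-level set is needed) and truncate to 6.
import Mathlib
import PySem

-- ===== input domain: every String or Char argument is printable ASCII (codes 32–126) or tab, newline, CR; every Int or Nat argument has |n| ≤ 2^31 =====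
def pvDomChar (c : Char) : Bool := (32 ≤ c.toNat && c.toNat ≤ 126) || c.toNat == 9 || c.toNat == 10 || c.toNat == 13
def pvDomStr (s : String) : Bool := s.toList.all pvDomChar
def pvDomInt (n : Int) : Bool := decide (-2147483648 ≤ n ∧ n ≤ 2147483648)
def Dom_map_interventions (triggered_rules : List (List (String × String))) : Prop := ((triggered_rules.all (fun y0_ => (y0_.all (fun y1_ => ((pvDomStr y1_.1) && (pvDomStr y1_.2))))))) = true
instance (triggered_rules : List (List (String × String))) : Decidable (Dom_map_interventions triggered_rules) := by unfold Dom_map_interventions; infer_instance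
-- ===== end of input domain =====

-- B replaces A's per-string seen-set dedup by theory-level dedup over a lookup table (simpler).

-- ===== PORT A =====
-- r.get("theory", "")
def pvGetTheory (r : List (String × String)) : String :=
  PySem.Dict.getD (PySem.Dict.mk r) "theory" ""

-- the inner "for s in [...]: if s not in seen: res.append(s); seen.add(s)" loop
def pvAddAll (st : List String × PySem.Set String) (l : List String) :
    List String × PySem.Set String :=
  l.foldl (fun p s =>
    if PySem.Set.contains p.2 s then p else (p.1 ++ [s], PySem.Set.add p.2 s)) st

-- the body of A's outer loop, given t = r.get("theory","")
def pvBranchA (st : List String × PySem.Set String) (t : String) :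
    List String × PySem.Set String :=
  if t = "Engagement" then
    pvAddAll st ["Increase learning interaction activities", "Set weekly learning goals", "Provide learning progress feedback"]
  else if t = "SelfEfficacy" then
    pvAddAll st ["Share success stories", "Break down complex tasks into small steps", "Give timely positive feedback"]
  else if t = "StudentIntegration" then
    pvAddAll st ["Invite to join study groups", "Encourage participation in forum discussions", "Organize online social activities"]
  else st

def map_interventions (triggered_rules : List (List (String × String))) : List String :=
  (triggered_rules.foldl (fun st r => pvBranchA st (pvGetTheory r))
    ([], PySem.Set.empty)).1.take 6

-- ===== PORT B =====
-- the module-level MAP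
def pvMAP : PySem.Dict String (List String) :=
  PySem.Dict.mk
    [("Engagement", ["Increase learning interaction activities", "Set weekly learning goals", "Provide learning progress feedback"]),
     ("SelfEfficacy", ["Share success stories", "Break down complex tasks into small steps", "Give timely positive feedback"]),
     ("StudentIntegration", ["Invite to join study groups", "Encourage participation in forum discussions", "Organize online social activities"])]

-- B's loop body: collect first occurrences of known theories
def pvBranchB (ord : List String) (t : String) : List String :=
  if PySem.Dict.contains pvMAP t ∧ t ∉ ord then ord ++ [t] else ord

def map_interventions_alt (triggered_rules : List (List (String × String))) : List String :=
  let ord := triggered_rules.foldl (fun o r => pvBranchB o (pvGetTheory r)) []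
  -- MAP[t]: t is always a key of pvMAP here, so getD with [] is exact
  (ord.flatMap (fun t => PySem.Dict.getD pvMAP t [])).take 6

-- ===== PRECONDITION & SPEC =====
def Spec_map_interventions (triggered_rules : List (List (String × String))) (out : List String) : Prop := out = map_interventions_alt triggered_rules
instance (triggered_rules : List (List (String × String))) (out : List String) : Decidable (Spec_map_interventions triggered_rules out) := by unfold Spec_map_interventions; infer_instance

-- ===== CLAIM (what is proved, stated in full; the proofs are below) =====
def Claim_equal_map_interventions : Prop := ∀ (triggered_rules : List (List (String × String))), Dom_map_interventions triggered_rules → Spec_map_interventions triggered_rules (map_interventions triggered_rules)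

-- ===== LEMMAS AND PROOFS =====

-- B's result list for a given theory order, and the matching A-state
def pvResOf (ord : List String) : List String :=
  ord.flatMap (fun t => PySem.Dict.getD pvMAP t [])

def pvStateOf (ord : List String) : List String × PySem.Set String :=
  (pvResOf ord, PySem.Set.ofList (pvResOf ord))

-- all orders of first occurrence that B's loop can ever produce
def pvORDERS : List (List String) :=
  [[], ["Engagement"], ["SelfEfficacy"], ["StudentIntegration"],
   ["Engagement", "SelfEfficacy"], ["Engagement", "StudentIntegration"],
   ["SelfEfficacy", "Engagement"], ["SelfEfficacy", "StudentIntegration"],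
   ["StudentIntegration", "Engagement"], ["StudentIntegration", "SelfEfficacy"],
   ["Engagement", "SelfEfficacy", "StudentIntegration"],
   ["Engagement", "StudentIntegration", "SelfEfficacy"],
   ["SelfEfficacy", "Engagement", "StudentIntegration"],
   ["SelfEfficacy", "StudentIntegration", "Engagement"],
   ["StudentIntegration", "Engagement", "SelfEfficacy"],
   ["StudentIntegration", "SelfEfficacy", "Engagement"]]

theorem pvStep (ord : List String) (h : ord ∈ pvORDERS) (t : String) :
    pvBranchA (pvStateOf ord) t = pvStateOf (pvBranchB ord t) ∧ pvBranchB ord t ∈ pvORDERS := by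
  by_cases hE : t = "Engagement"
  · subst hE
    exact (by decide :
      ∀ o ∈ pvORDERS, pvBranchA (pvStateOf o) "Engagement" = pvStateOf (pvBranchB o "Engagement")
        ∧ pvBranchB o "Engagement" ∈ pvORDERS) ord h
  by_cases hS : t = "SelfEfficacy"
  · subst hS
    exact (by decide :
      ∀ o ∈ pvORDERS, pvBranchA (pvStateOf o) "SelfEfficacy" = pvStateOf (pvBranchB o "SelfEfficacy")
        ∧ pvBranchB o "SelfEfficacy" ∈ pvORDERS) ord h
  by_cases hI : t = "StudentIntegration"
  · subst hI
    exact (by decide :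
      ∀ o ∈ pvORDERS, pvBranchA (pvStateOf o) "StudentIntegration" = pvStateOf (pvBranchB o "StudentIntegration")
        ∧ pvBranchB o "StudentIntegration" ∈ pvORDERS) ord h
  · have hc : PySem.Dict.contains pvMAP t = false := by
      simp only [pvMAP, PySem.Dict.contains_mk]
      simp
      exact ⟨fun h' => hE h'.symm, fun h' => hS h'.symm, fun h' => hI h'.symm⟩
    constructor
    · simp [pvBranchA, pvBranchB, hE, hS, hI, hc]
    · simp [pvBranchB, hc]
      exact h

theorem pvLoop (rules : List (List (String × String))) (ord : List String) (h : ord ∈ pvORDERS) :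
    rules.foldl (fun st r => pvBranchA st (pvGetTheory r)) (pvStateOf ord)
      = pvStateOf (rules.foldl (fun o r => pvBranchB o (pvGetTheory r)) ord)
    ∧ rules.foldl (fun o r => pvBranchB o (pvGetTheory r)) ord ∈ pvORDERS := by
  induction rules generalizing ord with
  | nil => exact ⟨rfl, h⟩
  | cons r rs ih =>
    obtain ⟨he, hm⟩ := pvStep ord h (pvGetTheory r)
    simpa [List.foldl_cons, he] using ih (pvBranchB ord (pvGetTheory r)) hm

-- ===== VERDICT (by name: the statement is the Claim_ definition above) =====
theorem map_interventions_spec : Claim_equal_map_interventions := by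
  intro rules _
  unfold Spec_map_interventions map_interventions map_interventions_alt
  have h0 : (([], PySem.Set.empty) : List String × PySem.Set String) = pvStateOf [] := by decide
  rw [h0, (pvLoop rules [] (by decide)).1]
  rfl
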